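-- pv_equiv track=rewrite | github.com/b-tree-labs/dendra | src/dendra/benchmarks/loaders.py | _collect_string_labels
-- ===== SOURCE A (Python) =====
-- def _collect_string_labels(pairs: list[tuple[str, str]]) -> list[str]:
--     seen: list[str] = []
--     s = set()
--     for _, lbl in pairs:
--         if lbl not in s:
--             s.add(lbl)
--             seen.append(lbl)
--     return sorted(seen)
-- ===== SOURCE B (Python) =====
-- def _collect_string_labels(pairs: list[tuple[str, str]]) -> list[str]:
--     labels = [lbl for _, lbl in pairs]
--     labels.sort()
--     out: list[str] = []
--     for x in labels:
--         if not out or x != out[-1]: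
--             out.append(x)
--     return out
-- ===== Notes on version B (the rewrite author's own statement) =====
-- stated objective: alternative
-- what changed: Replaces A's seen-set membership dedup followed by a sort with sort-all-labels-first then a single adjacent-duplicate-removal pass keeping only a 'previous element' (no set, no membership test).
import Mathlib
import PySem

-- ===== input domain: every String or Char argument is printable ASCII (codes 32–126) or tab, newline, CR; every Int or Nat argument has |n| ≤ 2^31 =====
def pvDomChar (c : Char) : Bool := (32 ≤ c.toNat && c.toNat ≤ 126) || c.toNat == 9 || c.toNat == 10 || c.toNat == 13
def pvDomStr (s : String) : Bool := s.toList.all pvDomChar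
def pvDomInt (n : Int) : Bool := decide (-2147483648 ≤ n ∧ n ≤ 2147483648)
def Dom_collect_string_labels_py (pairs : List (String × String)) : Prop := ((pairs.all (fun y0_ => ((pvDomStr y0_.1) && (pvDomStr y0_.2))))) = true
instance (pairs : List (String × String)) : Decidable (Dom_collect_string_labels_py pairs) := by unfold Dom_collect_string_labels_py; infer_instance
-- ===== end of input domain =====

-- B replaces A's seen-set membership dedup + final sort by sort-all-labels then one
-- adjacent-duplicate-removal pass (no set, no membership test); same cost, alternative algorithm.


-- ===== PORT A =====
-- seen/s accumulate over the pairs; `lbl not in s` is Set.contains; final sorted(seen).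
def collect_string_labels_py (pairs : List (String × String)) : List String :=
  let r := pairs.foldl
    (fun st p =>
      if PySem.Set.contains st.2 p.2 then st
      else (st.1 ++ [p.2], PySem.Set.add st.2 p.2))
    (([] : List String), ([] : PySem.Set String))
  PySem.List.sorted r.1 (fun x => x) false

-- ===== PORT B =====
-- labels = [lbl for _, lbl in pairs]; labels.sort(); adjacent-dedup pass.
-- `not out or x != out[-1]` on a list is exactly `out.getLast? ≠ some x`.
def collect_string_labels_py_alt (pairs : List (String × String)) : List String :=
  let labels := pairs.map (fun p => p.2)
  let sortedLabels := PySem.List.sorted labels (fun x => x) false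
  sortedLabels.foldl (fun out x => if out.getLast? = some x then out else out ++ [x]) []

-- ===== PRECONDITION & SPEC =====
def Spec_collect_string_labels_py (pairs : List (String × String)) (out : List String) : Prop := out = collect_string_labels_py_alt pairs
instance (pairs : List (String × String)) (out : List String) : Decidable (Spec_collect_string_labels_py pairs out) := by unfold Spec_collect_string_labels_py; infer_instance

-- ===== CLAIM (what is proved, stated in full; the proofs are below) =====
def Claim_equal_collect_string_labels_py : Prop := ∀ (pairs : List (String × String)), Dom_collect_string_labels_py pairs → Spec_collect_string_labels_py pairs (collect_string_labels_py pairs)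

-- ===== LEMMAS AND PROOFS =====

-- A's loop keeps seen = s; both are Set.add folded over the labels.
theorem pvA_state (ps : List (String × String)) (t : PySem.Set String) :
    ps.foldl
      (fun st p =>
        if PySem.Set.contains st.2 p.2 then st
        else (st.1 ++ [p.2], PySem.Set.add st.2 p.2))
      (t, t)
    = (ps.foldl (fun s p => PySem.Set.add s p.2) t,
       ps.foldl (fun s p => PySem.Set.add s p.2) t) := by
  induction ps generalizing t with
  | nil => rfl
  | cons p ps ih =>
      simp only [List.foldl_cons]
      have hstep : (if PySem.Set.contains t p.2 then (t, t)
          else (t ++ [p.2], PySem.Set.add t p.2))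
          = (PySem.Set.add t p.2, PySem.Set.add t p.2) := by
        by_cases h : p.2 ∈ t <;> simp [PySem.Set.add, h]
      rw [hstep, ih]

theorem pvA_seen (ps : List (String × String)) :
    (ps.foldl
      (fun st p =>
        if PySem.Set.contains st.2 p.2 then st
        else (st.1 ++ [p.2], PySem.Set.add st.2 p.2))
      (([] : List String), ([] : PySem.Set String))).1
    = PySem.Set.ofList (ps.map (fun p => p.2)) := by
  rw [pvA_state]
  rw [PySem.Set.ofList_eq_foldl, ← List.foldl_map (f := fun p : String × String => p.2)]

-- every element of a strictly increasing list is ≤ its last element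
theorem pvLe_getLast (acc : List String) (l a : String)
    (hp : acc.Pairwise (· < ·)) (hl : acc.getLast? = some l) (ha : a ∈ acc) : a ≤ l := by
  induction acc with
  | nil => cases ha
  | cons b bs ih =>
      rcases List.mem_cons.mp ha with rfl | ha
      · cases bs with
        | nil => simp_all
        | cons c cs =>
            have hlc : (c :: cs).getLast? = some l := by simpa using hl
            have hmem : l ∈ c :: cs := List.mem_of_getLast? hlc
            exact le_of_lt ((List.pairwise_cons.mp hp).1 l hmem)
      · cases bs with
        | nil => cases ha
        | cons c cs =>
            exact ih (List.pairwise_cons.mp hp).2 (by simpa using hl) ha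

-- B's adjacent-dedup fold on a ≤-sorted suffix: result is strictly increasing and
-- has exactly the elements of acc and the suffix.
theorem pvB_fold (ys : List String) (acc : List String)
    (hys : ys.Pairwise (· ≤ ·))
    (hacc : acc.Pairwise (· < ·))
    (hle : ∀ l, acc.getLast? = some l → ∀ z ∈ ys, l ≤ z) :
    (ys.foldl (fun out x => if out.getLast? = some x then out else out ++ [x]) acc).Pairwise (· < ·)
    ∧ ∀ a, a ∈ ys.foldl (fun out x => if out.getLast? = some x then out else out ++ [x]) acc
        ↔ a ∈ acc ∨ a ∈ ys := by
  induction ys generalizing acc with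
  | nil => simpa using hacc
  | cons x xs ih =>
      have hx : ∀ z ∈ xs, x ≤ z := fun z hz => (List.pairwise_cons.mp hys).1 z hz
      have hxs := (List.pairwise_cons.mp hys).2
      simp only [List.foldl_cons]
      by_cases h : acc.getLast? = some x
      · rw [if_pos h]
        have hxmem : x ∈ acc := List.mem_of_getLast? h
        have hle' : ∀ l, acc.getLast? = some l → ∀ z ∈ xs, l ≤ z := by
          intro l hl z hz
          have hlx : l = x := by rw [h] at hl; exact (Option.some.inj hl).symm
          exact hlx ▸ hx z hz
        obtain ⟨h1, h2⟩ := ih acc hxs hacc hle'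
        refine ⟨h1, fun a => ?_⟩
        rw [h2]
        constructor
        · rintro (ha | ha)
          · exact Or.inl ha
          · exact Or.inr (List.mem_cons_of_mem _ ha)
        · rintro (ha | ha)
          · exact Or.inl ha
          · rcases List.mem_cons.mp ha with rfl | ha
            · exact Or.inl hxmem
            · exact Or.inr ha
      · rw [if_neg h]
        have hlt : ∀ a ∈ acc, a < x := by
          intro a ha
          obtain ⟨l, hl⟩ : ∃ l, acc.getLast? = some l :=
            Option.isSome_iff_exists.mp (List.getLast?_isSome.mpr (List.ne_nil_of_mem ha))
          have hal : a ≤ l := pvLe_getLast acc l a hacc hl ha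
          have hlx : l ≤ x := hle l hl x List.mem_cons_self
          have hne : l ≠ x := fun he => h (he ▸ hl)
          exact lt_of_le_of_lt hal (lt_of_le_of_ne hlx hne)
        have hacc' : (acc ++ [x]).Pairwise (· < ·) := by
          rw [List.pairwise_append]
          exact ⟨hacc, List.pairwise_singleton _ _, by simpa using hlt⟩
        have hle' : ∀ l, (acc ++ [x]).getLast? = some l → ∀ z ∈ xs, l ≤ z := by
          intro l hl z hz
          have hlx : l = x := by simpa using hl.symm
          exact hlx ▸ hx z hz
        obtain ⟨h1, h2⟩ := ih (acc ++ [x]) hxs hacc' hle'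
        refine ⟨h1, fun a => ?_⟩
        rw [h2]
        simp [or_comm, or_left_comm, or_assoc]

theorem pvMain (pairs : List (String × String)) :
    collect_string_labels_py pairs = collect_string_labels_py_alt pairs := by
  unfold collect_string_labels_py collect_string_labels_py_alt
  simp only [pvA_seen]
  set labels := pairs.map (fun p => p.2) with hlabels
  set R := (PySem.List.sorted labels (fun x => x) false).foldl
      (fun out x => if out.getLast? = some x then out else out ++ [x]) [] with hR
  obtain ⟨hRp, hRm⟩ := pvB_fold (PySem.List.sorted labels (fun x => x) false) []
    (PySem.List.sorted_pairwise labels (fun x => x))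
    List.Pairwise.nil (by simp)
  have hmemR : ∀ a, a ∈ R ↔ a ∈ PySem.Set.ofList labels := by
    intro a
    rw [hR, hRm a]
    simp [PySem.List.mem_sorted, PySem.Set.mem_ofList]
  have hnodupR : R.Nodup := hRp.imp ne_of_lt
  have hperm : R.Perm (PySem.Set.ofList labels) :=
    (List.perm_ext_iff_of_nodup hnodupR (PySem.Set.nodup_ofList labels)).mpr hmemR
  exact PySem.List.sorted_eq_of_perm_of_pairwise_lt (PySem.Set.ofList labels) R
    (fun x => x) hperm hRp

-- ===== VERDICT (by name: the statement is the Claim_ definition above) =====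
theorem collect_string_labels_py_spec : Claim_equal_collect_string_labels_py := by
  intro pairs _
  unfold Spec_collect_string_labels_py
  exact pvMain pairs
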